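-- pv_equiv track=rewrite | github.com/oceanwhiskey/codeforces | gcd_lcm_sum/gcd_lcm_sum_clean_code.py | find_a_and_b_for_lcm_and_gcd
-- ===== SOURCE A (Python) =====
-- from math import sqrt
--
-- def find_a_and_b_for_lcm_and_gcd(lcm, gcd, a_init, b_init):
--     # lcm*gcd = a*b
--     # => (1) lcm/gcd = a/gcd * b/gcd = aa * bb
--     # Note, that aa and bb are coprime.
--     # We try to find aa as one of the factors of lcm/gcd.
--     # Then bb = lcm/gcd/aa and we have to check that gcd(aa, bb) = 1.
--     lcm_divided_by_gcd = lcm // gcd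
--     for aa in divisors_from_sqrt_to_1(lcm_divided_by_gcd): # (2) Note that bb-aa increases with decreasing aa.
--         bb = lcm_divided_by_gcd // aa # follows from (1)
--         if gcd*(bb - aa) < b_init - a_init and is_coprime(aa, bb):
--             return gcd*aa, gcd*bb # Due to (2) we can shortcircuit here.
--     else:
--         return a_init, b_init
--
-- def is_coprime(a, b):
--      return calc_gcd(a, b) == 1
--
-- def divisors_from_sqrt_to_1(x):
--     for y in range(int(sqrt(x)), 0, -1):
--         if x % y == 0:
--             yield y
--
-- def calc_gcd(a, b):
--     if a == 0:
--         return b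
--     return calc_gcd(b % a, a)
-- ===== SOURCE B (Python) =====
-- from math import sqrt
--
-- def find_a_and_b_for_lcm_and_gcd(lcm, gcd, a_init, b_init):
--     # Factor x = lcm//gcd into its prime-power components; the coprime
--     # splittings x = aa*bb correspond exactly to the subsets of those
--     # components (aa a unitary divisor), so no per-candidate coprimality
--     # test is needed.  Take the largest qualifying aa <= int(sqrt(x)).
--     x = lcm // gcd
--     if x == 0:
--         return a_init, b_init
--     bound = int(sqrt(x))
--     best = 0
--     for aa in subset_products(prime_powers(x)):
--         if aa <= bound and gcd * (x // aa - aa) < b_init - a_init and best < aa: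
--             best = aa
--     if best == 0:
--         return a_init, b_init
--     return gcd * best, gcd * (x // best)
--
-- def prime_powers(x):
--     # prime-power components of x (x >= 1), by trial division
--     pps = []
--     p = 2
--     while p * p <= x:
--         if x % p == 0:
--             q = 1
--             while x % p == 0:
--                 q *= p
--                 x //= p
--             pps.append(q)
--         p += 1
--     if x > 1:
--         pps.append(x)
--     return pps
--
-- def subset_products(pps):
--     prods = [1]
--     for q in pps:
--         prods = prods + [r * q for r in prods]
--     return prods
-- ===== Notes on version B (the rewrite author's own statement) =====
-- stated objective: alternative
-- what changed: B factorizes x = lcm//gcd into prime powers by trial division and enumerates the 2^k subset products (the unitary divisors, which are exactly the coprime splittings, so the per-candidate gcd test disappears), keeping the largest one <= int(sqrt(x)) that meets the difference bound; A instead scans every divisor descending from int(sqrt(x)) and gcd-tests each.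
import Mathlib
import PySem

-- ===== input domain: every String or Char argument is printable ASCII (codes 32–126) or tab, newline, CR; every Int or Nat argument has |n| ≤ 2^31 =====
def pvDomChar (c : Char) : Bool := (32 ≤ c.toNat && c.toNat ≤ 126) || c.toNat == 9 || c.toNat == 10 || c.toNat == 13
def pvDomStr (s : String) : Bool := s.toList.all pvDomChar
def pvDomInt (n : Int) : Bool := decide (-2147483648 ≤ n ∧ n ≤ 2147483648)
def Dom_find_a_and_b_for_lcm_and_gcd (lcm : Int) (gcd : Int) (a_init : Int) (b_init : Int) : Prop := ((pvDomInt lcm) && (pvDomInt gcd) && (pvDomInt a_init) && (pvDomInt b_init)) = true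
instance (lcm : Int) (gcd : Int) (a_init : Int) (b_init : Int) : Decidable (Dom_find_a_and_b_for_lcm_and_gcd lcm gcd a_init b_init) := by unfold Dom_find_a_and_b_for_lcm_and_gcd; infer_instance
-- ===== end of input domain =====

-- B factorizes x = lcm//gcd into prime powers and enumerates the subset products (the coprime
-- splittings of x, so no per-candidate gcd test is needed), keeping the largest qualifying one;
-- A scans every divisor descending from int(sqrt(x)) and gcd-tests each.  Same cost, different
-- algorithm (objective: alternative).

-- ===== PORT A =====

-- termination fact for the port of calc_gcd (cited by its decreasing_by)
theorem pvModNatAbsLt (b a : Int) (h : a ≠ 0) : (PySem.Int.mod b a).natAbs < a.natAbs := by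
  rcases lt_or_gt_of_ne h with hneg | hpos
  · have := PySem.Int.mod_neg_bounds (a := b) hneg
    omega
  · have h1 := PySem.Int.mod_nonneg (a := b) hpos
    have h2 := PySem.Int.mod_lt (a := b) hpos
    omega

-- Python: calc_gcd(a, b)
def pvCalcGcd (a b : Int) : Int :=
  if h : a = 0 then b else pvCalcGcd (PySem.Int.mod b a) a
termination_by a.natAbs
decreasing_by exact pvModNatAbsLt b a h

-- int(sqrt(x)): exact port for 0 ≤ x ≤ 2^32, where int(math.sqrt(x)) is the integer square
-- root; Dom ∧ Pre_ give 0 ≤ lcm // gcd ≤ 2^31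
def pvIntSqrt (x : Int) : Int := (Nat.sqrt x.toNat : Int)

-- Python: divisors_from_sqrt_to_1(x)
def pvDivisorsFromSqrtTo1 (x : Int) : List Int :=
  (PySem.List.pyRange (pvIntSqrt x) 0 (-1)).filter (fun y => PySem.Int.mod x y == 0)

-- A's for-loop with early return on the first valid pair
def pvALoop (gcd a_init b_init x : Int) : List Int → Int × Int
  | [] => (a_init, b_init)
  | aa :: rest =>
    let bb := PySem.Int.floordiv x aa
    if gcd * (bb - aa) < b_init - a_init ∧ pvCalcGcd aa bb = 1 then (gcd * aa, gcd * bb)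
    else pvALoop gcd a_init b_init x rest

def find_a_and_b_for_lcm_and_gcd (lcm : Int) (gcd : Int) (a_init : Int) (b_init : Int) : Int × Int :=
  let x := PySem.Int.floordiv lcm gcd
  pvALoop gcd a_init b_init x (pvDivisorsFromSqrtTo1 x)

-- ===== PORT B =====

-- termination facts for the ports (cited by name in decreasing_by so the
-- definitions stay small)
theorem pvExtractDec (p x : Int) (hp : 2 ≤ p) (hx : 1 ≤ x)
    (hm : (PySem.Int.mod x p == 0) = true) :
    (PySem.Int.floordiv x p).toNat < x.toNat := by
  obtain ⟨t, ht⟩ := Int.dvd_of_emod_eq_zero (show x % p = 0 by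
    have := PySem.Int.mod_eq_emod_of_pos (a := x) (b := p) (by omega)
    simpa [this] using hm)
  have hfd : PySem.Int.floordiv x p = x / p := PySem.Int.floordiv_eq_ediv_of_pos (by omega)
  have hxp : x / p = t := by rw [ht]; exact Int.mul_ediv_cancel_left t (by omega)
  have ht1 : 1 ≤ t := by nlinarith
  have htx : t < x := by nlinarith
  simp only [hfd, hxp]
  omega

-- inner while of prime_powers: divide out the prime p, accumulating q
-- (the '2 ≤ p ∧ 1 ≤ x' guard parts only make the recursion total; they hold at every
-- state the Python loop reaches, so the port computes exactly what the Python computes)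
def pvExtract (p q x : Int) : Int × Int :=
  if h : 2 ≤ p ∧ 1 ≤ x ∧ PySem.Int.mod x p == 0 then
    pvExtract p (q * p) (PySem.Int.floordiv x p)
  else (q, x)
termination_by x.toNat
decreasing_by exact pvExtractDec p x h.1 h.2.1 h.2.2

-- x never grows along pvExtract (cited by pvPrimePowers' decreasing_by)
theorem pvExtract_le (p q x : Int) (hx : 0 ≤ x) :
    0 ≤ (pvExtract p q x).2 ∧ (pvExtract p q x).2 ≤ x := by
  rw [pvExtract]
  split
  · next h =>
    obtain ⟨hp, hx1, hm⟩ := h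
    have hfd : PySem.Int.floordiv x p = x / p := PySem.Int.floordiv_eq_ediv_of_pos (by omega)
    have h2 : 0 ≤ x / p := Int.ediv_nonneg hx (by omega)
    have h3 : x / p ≤ x := Int.ediv_le_self p hx
    have hrec := pvExtract_le p (q * p) (PySem.Int.floordiv x p) (by rw [hfd]; exact h2)
    refine ⟨hrec.1, le_trans hrec.2 (by rw [hfd]; exact h3)⟩
  · exact ⟨hx, le_refl x⟩
termination_by x.toNat
decreasing_by exact pvExtractDec p x hp hx1 hm

-- measure facts for the outer while (cited by name in decreasing_by)
theorem pvPPDec1 (p x : Int) (hguard : p * p ≤ x) :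
    ((pvExtract p 1 x).2 + 2 - (p + 1)).toNat < (x + 2 - p).toNat := by
  have hx0 : 0 ≤ x := le_trans (mul_self_nonneg p) hguard
  have hle := pvExtract_le p 1 x hx0
  have hp2 : p < x + 2 := by nlinarith [sq_nonneg (p - 1)]
  omega

theorem pvPPDec2 (p x : Int) (hguard : p * p ≤ x) :
    (x + 2 - (p + 1)).toNat < (x + 2 - p).toNat := by
  have hx0 : 0 ≤ x := le_trans (mul_self_nonneg p) hguard
  have hp2 : p < x + 2 := by nlinarith [sq_nonneg (p - 1)]
  omega

-- outer while of prime_powers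
def pvPrimePowers (x p : Int) (pps : List Int) : List Int :=
  if hguard : p * p ≤ x then
    if PySem.Int.mod x p == 0 then
      pvPrimePowers (pvExtract p 1 x).2 (p + 1) (pps ++ [(pvExtract p 1 x).1])
    else pvPrimePowers x (p + 1) pps
  else if 1 < x then pps ++ [x] else pps
termination_by (x + 2 - p).toNat
decreasing_by
  · exact pvPPDec1 p x hguard
  · exact pvPPDec2 p x hguard

-- Python: subset_products(pps)
def pvSubsetProducts (pps : List Int) : List Int :=
  pps.foldl (fun prods q => prods ++ prods.map (fun r => r * q)) [1]

-- B's for-loop body: keep the largest qualifying subset product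
def pvBStep (gcd a_init b_init x bound : Int) (best aa : Int) : Int :=
  if aa ≤ bound ∧ gcd * (PySem.Int.floordiv x aa - aa) < b_init - a_init ∧ best < aa then aa
  else best

def find_a_and_b_for_lcm_and_gcd_alt (lcm : Int) (gcd : Int) (a_init : Int) (b_init : Int) : Int × Int :=
  let x := PySem.Int.floordiv lcm gcd
  if x = 0 then (a_init, b_init)
  else
    let bound := pvIntSqrt x
    let best := (pvSubsetProducts (pvPrimePowers x 2 [])).foldl (pvBStep gcd a_init b_init x bound) 0
    if best = 0 then (a_init, b_init)
    else (gcd * best, gcd * (PySem.Int.floordiv x best))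

-- ===== PRECONDITION & SPEC =====
-- Exactly where Python A returns: gcd = 0 raises ZeroDivisionError, and a negative lcm // gcd
-- makes math.sqrt raise ValueError.
def Pre_find_a_and_b_for_lcm_and_gcd (lcm : Int) (gcd : Int) (a_init : Int) (b_init : Int) : Prop :=
  gcd ≠ 0 ∧ 0 ≤ PySem.Int.floordiv lcm gcd
instance (lcm : Int) (gcd : Int) (a_init : Int) (b_init : Int) : Decidable (Pre_find_a_and_b_for_lcm_and_gcd lcm gcd a_init b_init) := by unfold Pre_find_a_and_b_for_lcm_and_gcd; infer_instance

def pvWitness_find_a_and_b_for_lcm_and_gcd : Int × Int × Int × Int := (12, 2, 1, 100)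

def Spec_find_a_and_b_for_lcm_and_gcd (lcm : Int) (gcd : Int) (a_init : Int) (b_init : Int) (out : Int × Int) : Prop := out = find_a_and_b_for_lcm_and_gcd_alt lcm gcd a_init b_init
instance (lcm : Int) (gcd : Int) (a_init : Int) (b_init : Int) (out : Int × Int) : Decidable (Spec_find_a_and_b_for_lcm_and_gcd lcm gcd a_init b_init out) := by unfold Spec_find_a_and_b_for_lcm_and_gcd; infer_instance

-- ===== CLAIM (what is proved, stated in full; the proofs are below) =====
def Claim_equal_find_a_and_b_for_lcm_and_gcd : Prop := ∀ (lcm : Int) (gcd : Int) (a_init : Int) (b_init : Int), Dom_find_a_and_b_for_lcm_and_gcd lcm gcd a_init b_init → Pre_find_a_and_b_for_lcm_and_gcd lcm gcd a_init b_init → Spec_find_a_and_b_for_lcm_and_gcd lcm gcd a_init b_init (find_a_and_b_for_lcm_and_gcd lcm gcd a_init b_init)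

-- ===== LEMMAS AND PROOFS =====

-- ---- the Euclidean recursion computes Int.gcd on nonnegative arguments ----
theorem pvCalcGcdAux (n : Nat) : ∀ a b : Int, a.natAbs ≤ n → 0 ≤ a → 0 ≤ b →
    pvCalcGcd a b = (Int.gcd a b : Int) := by
  induction n with
  | zero =>
    intro a b hn ha hb
    have : a = 0 := by omega
    subst this
    rw [pvCalcGcd]
    simp [Int.gcd]
    exact (abs_of_nonneg hb).symm
  | succ n ih =>
    intro a b hn ha hb
    rw [pvCalcGcd]
    split
    · next h => subst h; simp [Int.gcd]; exact (abs_of_nonneg hb).symm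
    · next h =>
      have hpos : 0 < a := lt_of_le_of_ne ha (Ne.symm h)
      have hm : PySem.Int.mod b a = b % a := PySem.Int.mod_eq_emod_of_pos hpos
      have hlt := pvModNatAbsLt b a h
      rw [ih _ _ (by omega) (by rw [hm]; exact Int.emod_nonneg b h) ha]
      congr 1
      rw [hm]
      show Nat.gcd (b % a).natAbs a.natAbs = Nat.gcd a.natAbs b.natAbs
      have hmn : (b % a).natAbs = b.natAbs % a.natAbs := Int.natAbs_emod_of_nonneg hb a
      rw [hmn]
      exact (Nat.gcd_rec a.natAbs b.natAbs).symm

theorem pvCalcGcd_eq (a b : Int) (ha : 0 ≤ a) (hb : 0 ≤ b) :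
    pvCalcGcd a b = (Int.gcd a b : Int) :=
  pvCalcGcdAux a.natAbs a b le_rfl ha hb

-- ---- number-theoretic toolkit ----

-- prime-power predicate for the factorization components
def PvPP (q : Int) : Prop := ∃ (p : Int) (k : Nat), Prime p ∧ 2 ≤ p ∧ 1 ≤ k ∧ p ^ k = q

theorem coprime_of_prime_not_dvd (p x : Int) (hp : Prime p) (h : ¬ p ∣ x) : IsCoprime p x := by
  rw [Int.isCoprime_iff_gcd_eq_one]
  have hnp : p.natAbs.Prime := Int.prime_iff_natAbs_prime.mp hp
  have h1 : Int.gcd p x ∣ p.natAbs := Nat.gcd_dvd_left _ _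
  rcases (Nat.Prime.eq_one_or_self_of_dvd hnp _ h1) with h2 | h2
  · exact h2
  · exfalso
    apply h
    have h3 : (↑(Int.gcd p x) : Int) ∣ x := Int.gcd_dvd_right p x
    rw [h2] at h3
    exact Int.natAbs_dvd.mp h3

theorem isCoprime_list_prod (a : Int) (l : List Int) (h : ∀ b ∈ l, IsCoprime a b) :
    IsCoprime a l.prod := by
  induction l with
  | nil => simp [isCoprime_one_right]
  | cons b l ih =>
    rw [List.prod_cons]
    exact IsCoprime.mul_right (h b (List.mem_cons_self ..))
      (ih (fun c hc => h c (List.mem_cons_of_mem _ hc)))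

theorem prime_of_no_small_divisor (p : Int) (hp : 2 ≤ p)
    (h : ∀ d : Int, 2 ≤ d → d < p → ¬ d ∣ p) : Prime p := by
  rw [Int.prime_iff_natAbs_prime]
  rw [Nat.prime_def_lt]
  constructor
  · omega
  · intro m hm hmd
    by_contra hm1
    have hm0 : m ≠ 0 := by
      intro h0; subst h0
      have : p.natAbs = 0 := Nat.eq_zero_of_zero_dvd hmd
      omega
    have hm2 : 2 ≤ m := by omega
    have hmdI : (m : Int) ∣ p := by
      have : (m : Int) ∣ (p.natAbs : Int) := Int.natCast_dvd_natCast.mpr hmd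
      rwa [Int.natAbs_of_nonneg (by omega)] at this
    exact h m (by exact_mod_cast hm2) (by omega) hmdI

theorem prime_of_no_divisor_lt_sqrt (x p : Int) (hx : 2 ≤ x) (hp : 2 ≤ p)
    (hpp : x < p * p) (h : ∀ d : Int, 2 ≤ d → d < p → ¬ d ∣ x) : Prime x := by
  rw [Int.prime_iff_natAbs_prime, Nat.prime_def_lt]
  constructor
  · omega
  · intro m hm hmd
    by_contra hm1
    have hm0 : m ≠ 0 := by
      intro h0; subst h0
      have : x.natAbs = 0 := Nat.eq_zero_of_zero_dvd hmd
      omega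
    have hm2 : 2 ≤ m := by omega
    obtain ⟨m', hmm'⟩ : ∃ m' : Nat, m * m' = x.natAbs := ⟨_, Nat.mul_div_cancel' hmd⟩
    have hm'd : m' ∣ x.natAbs := Dvd.intro_left m hmm'
    have hm'1 : m' ≠ 1 := by
      intro h1; rw [h1, Nat.mul_one] at hmm'; omega
    have hm'0 : m' ≠ 0 := by
      intro h0; rw [h0, Nat.mul_zero] at hmm'; omega
    have hcast : ((m : Int)) ∣ x := by
      have : (m : Int) ∣ (x.natAbs : Int) := Int.natCast_dvd_natCast.mpr hmd
      rwa [Int.natAbs_of_nonneg (by omega)] at this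
    have hcast' : ((m' : Int)) ∣ x := by
      have : (m' : Int) ∣ (x.natAbs : Int) := Int.natCast_dvd_natCast.mpr hm'd
      rwa [Int.natAbs_of_nonneg (by omega)] at this
    by_cases hmp : (m : Int) < p
    · exact h m (by exact_mod_cast hm2) hmp hcast
    · -- p ≤ m, so m' < p
      have hxI : (m : Int) * (m' : Int) = x := by
        have h' := congrArg (fun n : Nat => (n : Int)) hmm'
        push_cast at h'
        rwa [abs_of_nonneg (by omega : (0:Int) ≤ x)] at h'
      have hm'p : (m' : Int) < p := by
        nlinarith [hxI, not_lt.mp hmp, (by positivity : (0:Int) ≤ (m' : Int))]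
      exact h m' (by exact_mod_cast (by omega : 2 ≤ m')) hm'p hcast'

-- ---- spec of the inner division loop ----
theorem pvExtract_spec (p q x : Int) (hp : 2 ≤ p) (hx : 1 ≤ x) :
    ∃ e : Nat, (pvExtract p q x).1 = q * p ^ e ∧ p ^ e * (pvExtract p q x).2 = x ∧
      1 ≤ (pvExtract p q x).2 ∧ ¬ p ∣ (pvExtract p q x).2 := by
  rw [pvExtract]
  split
  · next h =>
    obtain ⟨-, -, hm⟩ := h
    have hdvd : p ∣ x := Int.dvd_of_emod_eq_zero (by
      have := PySem.Int.mod_eq_emod_of_pos (a := x) (b := p) (by omega)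
      simpa [this] using hm)
    obtain ⟨t, ht⟩ := hdvd
    have hfd : PySem.Int.floordiv x p = x / p := PySem.Int.floordiv_eq_ediv_of_pos (by omega)
    have hxp : x / p = t := by rw [ht]; exact Int.mul_ediv_cancel_left t (by omega)
    have ht1 : 1 ≤ t := by nlinarith
    obtain ⟨e, h1, h2, h3, h4⟩ := pvExtract_spec p (q * p) (PySem.Int.floordiv x p) hp (by rw [hfd, hxp]; exact ht1)
    refine ⟨e + 1, ?_, ?_, h3, h4⟩
    · rw [h1]; ring
    · rw [pow_succ]
      have : p ^ e * (pvExtract p (q * p) (PySem.Int.floordiv x p)).2 = t := by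
        rw [h2, hfd, hxp]
      nlinarith [this]
  · next h =>
    have hnm : ¬ (PySem.Int.mod x p == 0) := by
      intro hm; exact h ⟨hp, hx, hm⟩
    refine ⟨0, by ring, by simp, hx, ?_⟩
    intro hdvd
    apply hnm
    have := PySem.Int.mod_eq_emod_of_pos (a := x) (b := p) (by omega)
    simp [this, Int.emod_eq_zero_of_dvd hdvd]
termination_by x.toNat
decreasing_by exact pvExtractDec p x hp (by omega) hm

-- ---- invariant of the trial-division loop: the result is a coprime prime-power factorization ----
theorem pvPrimePowers_inv (x p : Int) (pps : List Int)
    (hx : 1 ≤ x) (hp : 2 ≤ p)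
    (hmin : ∀ d : Int, 2 ≤ d → d < p → ¬ d ∣ x)
    (h2 : ∀ q ∈ pps, PvPP q)
    (h3 : pps.Pairwise IsCoprime)
    (h4 : ∀ q ∈ pps, IsCoprime q x) :
    (pvPrimePowers x p pps).prod = pps.prod * x ∧
    (∀ q ∈ pvPrimePowers x p pps, PvPP q) ∧
    (pvPrimePowers x p pps).Pairwise IsCoprime := by
  rw [pvPrimePowers]
  split
  · next hguard =>
    split
    · next hm =>
      have hdvd : p ∣ x := Int.dvd_of_emod_eq_zero (by
        have := PySem.Int.mod_eq_emod_of_pos (a := x) (b := p) (by omega)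
        simpa [this] using hm)
      have hprime : Prime p := prime_of_no_small_divisor p hp
        (fun d hd hlt hdp => hmin d hd hlt (hdp.trans hdvd))
      obtain ⟨e, hq1, hq2, hx', hnd⟩ := pvExtract_spec p 1 x hp hx
      have hqval : (pvExtract p 1 x).1 = p ^ e := by rw [hq1]; ring
      have he1 : 1 ≤ e := by
        by_contra he
        have he0 : e = 0 := by omega
        rw [he0, pow_zero, one_mul] at hq2
        rw [hq2] at hnd
        exact hnd hdvd
      have hqpp : PvPP (pvExtract p 1 x).1 := ⟨p, e, hprime, hp, he1, hqval.symm⟩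
      have hqx : (pvExtract p 1 x).1 * (pvExtract p 1 x).2 = x := by rw [hqval]; exact hq2
      have hcopqx' : IsCoprime (pvExtract p 1 x).1 (pvExtract p 1 x).2 := by
        rw [hqval]
        exact (coprime_of_prime_not_dvd p _ hprime hnd).pow_left
      have hx'dvd : (pvExtract p 1 x).2 ∣ x :=
        ⟨(pvExtract p 1 x).1, by rw [mul_comm]; exact hqx.symm⟩
      have hmin' : ∀ d : Int, 2 ≤ d → d < p + 1 → ¬ d ∣ (pvExtract p 1 x).2 := by
        intro d hd hlt hdx
        rcases (by omega : d < p ∨ d = p) with hc | hc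
        · exact hmin d hd hc (hdx.trans hx'dvd)
        · subst hc; exact hnd hdx
      have hgu : p * p ≤ x := hguard
      obtain ⟨ha, hb, hc⟩ := pvPrimePowers_inv (pvExtract p 1 x).2 (p + 1)
        (pps ++ [(pvExtract p 1 x).1]) hx' (by omega) hmin'
        (by
          intro q hq
          rcases List.mem_append.mp hq with hq | hq
          · exact h2 q hq
          · simp at hq; subst hq; exact hqpp)
        (by
          rw [List.pairwise_append]
          refine ⟨h3, List.pairwise_singleton _ _, ?_⟩
          intro a ha' b hb'
          simp at hb'; subst hb'
          exact (h4 a ha').of_isCoprime_of_dvd_right ⟨(pvExtract p 1 x).2, hqx.symm⟩)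
        (by
          intro q hq
          rcases List.mem_append.mp hq with hq | hq
          · exact (h4 q hq).of_isCoprime_of_dvd_right hx'dvd
          · simp at hq; subst hq; exact hcopqx')
      refine ⟨?_, hb, hc⟩
      rw [ha]
      simp only [List.prod_append, List.prod_cons, List.prod_nil, mul_one]
      rw [mul_assoc, hqx]
    · next hm =>
      have hnd : ¬ p ∣ x := by
        intro hdvd
        apply hm
        have := PySem.Int.mod_eq_emod_of_pos (a := x) (b := p) (by omega)
        simp [this, Int.emod_eq_zero_of_dvd hdvd]
      have hgu : p * p ≤ x := hguard
      exact pvPrimePowers_inv x (p + 1) pps hx (by omega)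
        (by
          intro d hd hlt hdx
          rcases (by omega : d < p ∨ d = p) with hc | hc
          · exact hmin d hd hc hdx
          · subst hc; exact hnd hdx)
        h2 h3 h4
  · next hguard =>
    split
    · next hx1 =>
      have hprime : Prime x := prime_of_no_divisor_lt_sqrt x p (by omega) hp (by omega) hmin
      refine ⟨by rw [List.prod_append, List.prod_cons, List.prod_nil, mul_one], ?_, ?_⟩
      · intro q hq
        rcases List.mem_append.mp hq with hq | hq
        · exact h2 q hq
        · simp at hq
          rw [hq]
          exact ⟨x, 1, hprime, by omega, le_rfl, pow_one x⟩
      · rw [List.pairwise_append]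
        refine ⟨h3, List.pairwise_singleton _ _, ?_⟩
        intro a ha' b hb'
        simp at hb'; subst hb'
        exact h4 a ha'
    · next hx1 =>
      have : x = 1 := by omega
      subst this
      exact ⟨by simp, h2, h3⟩
termination_by (x + 2 - p).toNat
decreasing_by
  · exact pvPPDec2 p x hgu
  · exact pvPPDec1 p x hgu

-- ---- subset products = sublist products ----
theorem mem_SP_foldl (qs : List Int) : ∀ (acc : List Int) (a : Int),
    (a ∈ qs.foldl (fun prods q => prods ++ prods.map (fun r => r * q)) acc ↔
      ∃ r ∈ acc, ∃ s : List Int, s.Sublist qs ∧ a = r * s.prod) := by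
  induction qs with
  | nil =>
    intro acc a
    simp only [List.foldl_nil]
    constructor
    · intro ha; exact ⟨a, ha, [], List.Sublist.refl _, by simp⟩
    · rintro ⟨r, hr, s, hs, rfl⟩
      rw [List.sublist_nil.mp hs]
      simpa using hr
  | cons q rest ih =>
    intro acc a
    rw [List.foldl_cons, ih]
    constructor
    · rintro ⟨r, hr, s, hs, rfl⟩
      rcases List.mem_append.mp hr with hr | hr
      · exact ⟨r, hr, s, hs.cons q, rfl⟩
      · obtain ⟨r', hr', rfl⟩ := List.mem_map.mp hr
        exact ⟨r', hr', q :: s, hs.cons₂ q, by rw [List.prod_cons]; ring⟩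
    · rintro ⟨r, hr, s, hs, rfl⟩
      rcases List.sublist_cons_iff.mp hs with hs' | ⟨t, rfl, ht⟩
      · exact ⟨r, List.mem_append.mpr (Or.inl hr), s, hs', rfl⟩
      · refine ⟨r * q, List.mem_append.mpr (Or.inr (List.mem_map.mpr ⟨r, hr, rfl⟩)), t, ht, ?_⟩
        rw [List.prod_cons]; ring

theorem mem_pvSubsetProducts (qs : List Int) (a : Int) :
    a ∈ pvSubsetProducts qs ↔ ∃ s : List Int, s.Sublist qs ∧ a = s.prod := by
  rw [pvSubsetProducts, mem_SP_foldl]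
  constructor
  · rintro ⟨r, hr, s, hs, rfl⟩
    simp at hr; subst hr
    exact ⟨s, hs, by simp⟩
  · rintro ⟨s, hs, rfl⟩
    exact ⟨1, by simp, s, hs, by simp⟩

-- ---- soundness: every sublist product is a positive unitary divisor ----
theorem sublist_unitary {s qs : List Int} (h : s.Sublist qs)
    (hpos : ∀ q ∈ qs, 1 ≤ q) (hpw : qs.Pairwise IsCoprime) :
    1 ≤ s.prod ∧ ∃ c, s.prod * c = qs.prod ∧ IsCoprime s.prod c := by
  induction h with
  | slnil => exact ⟨le_rfl, 1, by simp, isCoprime_one_left⟩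
  | @cons s l a h ih =>
    obtain ⟨h1, c, hc, hcop⟩ := ih (fun q hq => hpos q (List.mem_cons_of_mem _ hq)) hpw.of_cons
    refine ⟨h1, c * a, ?_, ?_⟩
    · rw [List.prod_cons, ← hc]; ring
    · refine IsCoprime.mul_right hcop ?_
      have hsl : ∀ b ∈ s, IsCoprime b a :=
        fun b hb => (List.rel_of_pairwise_cons hpw (h.subset hb)).symm
      exact (isCoprime_list_prod a s (fun b hb => (hsl b hb).symm)).symm
  | @cons₂ s l a h ih =>
    obtain ⟨h1, c, hc, hcop⟩ := ih (fun q hq => hpos q (List.mem_cons_of_mem _ hq)) hpw.of_cons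
    have hapos : 1 ≤ a := hpos a (List.mem_cons_self ..)
    refine ⟨by rw [List.prod_cons]; nlinarith, c, ?_, ?_⟩
    · rw [List.prod_cons, List.prod_cons, ← hc]; ring
    · refine IsCoprime.mul_left ?_ hcop
      have hal : IsCoprime a l.prod :=
        isCoprime_list_prod a l (fun b hb => List.rel_of_pairwise_cons hpw hb)
      exact hal.of_isCoprime_of_dvd_right ⟨s.prod, by rw [← hc]; ring⟩

-- ---- completeness: every positive unitary divisor is a sublist product ----
theorem unitary_mem_sublist : ∀ (qs : List Int), (∀ q ∈ qs, PvPP q) → qs.Pairwise IsCoprime →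
    ∀ d c : Int, 1 ≤ d → d * c = qs.prod → IsCoprime d c →
    ∃ s : List Int, s.Sublist qs ∧ d = s.prod := by
  intro qs
  induction qs with
  | nil =>
    intro _ _ d c hd hdc hcop
    have hdvd : d ∣ 1 := ⟨c, by simpa using hdc.symm⟩
    have : d = 1 := Int.eq_one_of_dvd_one (by omega) hdvd
    exact ⟨[], List.Sublist.refl _, by simp [this]⟩
  | cons q rest ih =>
    intro hpp hpw d c hd hdc hcop
    obtain ⟨p, k, hprime, hp2, hk, hpk⟩ := hpp q (List.mem_cons_self ..)
    have hqpos : 0 < q := by rw [← hpk]; exact pow_pos (by omega) k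
    rw [List.prod_cons] at hdc
    have hpp' : ∀ q' ∈ rest, PvPP q' := fun q' hq' => hpp q' (List.mem_cons_of_mem _ hq')
    by_cases hpd : p ∣ d
    · have hpc : ¬ p ∣ c := fun hc => hprime.not_unit (hcop.isUnit_of_dvd' hpd hc)
      have hqc : IsCoprime q c := by
        rw [← hpk]; exact (coprime_of_prime_not_dvd p c hprime hpc).pow_left
      have hqdc : q ∣ d * c := by rw [hdc]; exact dvd_mul_right q rest.prod
      have hqd : q ∣ d := hqc.dvd_of_dvd_mul_right hqdc
      obtain ⟨d', hd'⟩ := hqd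
      have hd'pos : 1 ≤ d' := by nlinarith
      have hcancel : d' * c = rest.prod := by
        have h' : q * (d' * c) = q * rest.prod := by rw [← hdc, hd']; ring
        exact mul_left_cancel₀ (by omega) h'
      have hcop' : IsCoprime d' c := hcop.of_isCoprime_of_dvd_left ⟨q, by rw [hd']; ring⟩
      obtain ⟨s, hs, hsp⟩ := ih hpp' hpw.of_cons d' c hd'pos hcancel hcop'
      exact ⟨q :: s, hs.cons₂ q, by rw [List.prod_cons, hd', hsp]⟩
    · have hdq : IsCoprime d q := by
        rw [← hpk]; exact ((coprime_of_prime_not_dvd p d hprime hpd).pow_left).symm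
      have hddc : d ∣ q * rest.prod := by rw [← hdc]; exact dvd_mul_right d c
      have hdm : d ∣ rest.prod := hdq.dvd_of_dvd_mul_left hddc
      obtain ⟨c', hc'⟩ := hdm
      have hc_eq : c = q * c' := by
        apply mul_left_cancel₀ (show d ≠ 0 by omega)
        rw [hdc, hc']; ring
      have hcopc' : IsCoprime d c' := hcop.of_isCoprime_of_dvd_right ⟨q, by rw [hc_eq]; ring⟩
      obtain ⟨s, hs, hsp⟩ := ih hpp' hpw.of_cons d c' hd hc'.symm hcopc'
      exact ⟨s, hs.cons q, hsp⟩

-- ---- A's loop as a find? over the full predicate ----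
def pvFullP (g ai bi x y : Int) : Bool :=
  decide (PySem.Int.mod x y = 0 ∧ g * (PySem.Int.floordiv x y - y) < bi - ai ∧
    Int.gcd y (PySem.Int.floordiv x y) = 1)

theorem pvALoop_find (g ai bi x : Int) (hx : 0 ≤ x) :
    ∀ L : List Int, (∀ y ∈ L, 1 ≤ y) →
    pvALoop g ai bi x (L.filter (fun y => PySem.Int.mod x y == 0)) =
      (match L.find? (pvFullP g ai bi x) with
       | some m => (g * m, g * PySem.Int.floordiv x m)
       | none => (ai, bi)) := by
  intro L
  induction L with
  | nil => intro _; simp [pvALoop]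
  | cons y L ih =>
    intro hmem
    have hy : 1 ≤ y := hmem y (List.mem_cons_self ..)
    have hrest := fun z hz => hmem z (List.mem_cons_of_mem _ hz)
    have hbb : 0 ≤ PySem.Int.floordiv x y := by
      rw [PySem.Int.floordiv_eq_ediv_of_pos (by omega)]
      exact Int.ediv_nonneg hx (by omega)
    have hgcd : pvCalcGcd y (PySem.Int.floordiv x y) = 1 ↔
        Int.gcd y (PySem.Int.floordiv x y) = 1 := by
      rw [pvCalcGcd_eq y _ (by omega) hbb]
      norm_cast
    rw [List.find?_cons]
    by_cases hdiv : PySem.Int.mod x y = 0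
    · rw [List.filter_cons_of_pos (by simpa using hdiv)]
      by_cases hcond : g * (PySem.Int.floordiv x y - y) < bi - ai ∧
          Int.gcd y (PySem.Int.floordiv x y) = 1
      · have hfull : pvFullP g ai bi x y = true := by
          unfold pvFullP; exact decide_eq_true ⟨hdiv, hcond.1, hcond.2⟩
        rw [hfull]
        simp only [pvALoop]
        rw [if_pos ⟨hcond.1, hgcd.mpr hcond.2⟩]
      · have hfull : pvFullP g ai bi x y = false := by
          unfold pvFullP
          simp only [decide_eq_false_iff_not]
          intro ⟨_, hc1, hc2⟩; exact hcond ⟨hc1, hc2⟩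
        rw [hfull]
        simp only [pvALoop]
        rw [if_neg (by intro ⟨hc1, hc2⟩; exact hcond ⟨hc1, hgcd.mp hc2⟩)]
        exact ih hrest
    · rw [List.filter_cons_of_neg (by simpa using hdiv)]
      have hfull : pvFullP g ai bi x y = false := by
        unfold pvFullP
        simp only [decide_eq_false_iff_not]
        intro ⟨hc0, _, _⟩; exact hdiv hc0
      rw [hfull]
      exact ih hrest

-- ---- find? on a strictly descending list returns the greatest qualifying element ----
theorem find?_desc_max {P : Int → Bool} : ∀ {L : List Int}, L.Pairwise (· > ·) →
    ∀ m, L.find? P = some m → P m = true ∧ m ∈ L ∧ ∀ y ∈ L, P y = true → y ≤ m := by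
  intro L
  induction L with
  | nil => intro _ m h; simp at h
  | cons a L ih =>
    intro hpw m hfind
    rw [List.find?_cons] at hfind
    by_cases hPa : P a = true
    · rw [hPa] at hfind
      simp at hfind; subst hfind
      refine ⟨hPa, List.mem_cons_self .., ?_⟩
      intro y hy _
      rcases List.mem_cons.mp hy with rfl | hy
      · exact le_rfl
      · exact le_of_lt (List.rel_of_pairwise_cons hpw hy)
    · rw [eq_false_of_ne_true hPa] at hfind
      obtain ⟨h1, h2, h3⟩ := ih hpw.of_cons m hfind
      refine ⟨h1, List.mem_cons_of_mem _ h2, ?_⟩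
      intro y hy hPy
      rcases List.mem_cons.mp hy with rfl | hy
      · exact absurd hPy hPa
      · exact h3 y hy hPy

theorem pyRange_desc (a b : Int) : (PySem.List.pyRange a b (-1)).Pairwise (· > ·) := by
  rw [PySem.List.pyRange_neg_one, List.pairwise_map]
  exact List.pairwise_lt_range.imp (by intro i j hij; omega)

-- ---- B's fold keeps the greatest qualifying candidate ----
theorem foldl_best (g ai bi x bound : Int) :
    ∀ (L : List Int) (b : Int),
    (L.foldl (pvBStep g ai bi x bound) b = b ∨
      (L.foldl (pvBStep g ai bi x bound) b ∈ L ∧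
       L.foldl (pvBStep g ai bi x bound) b ≤ bound ∧
       g * (PySem.Int.floordiv x (L.foldl (pvBStep g ai bi x bound) b) -
         L.foldl (pvBStep g ai bi x bound) b) < bi - ai)) ∧
    b ≤ L.foldl (pvBStep g ai bi x bound) b ∧
    ∀ aa ∈ L, aa ≤ bound → g * (PySem.Int.floordiv x aa - aa) < bi - ai →
      aa ≤ L.foldl (pvBStep g ai bi x bound) b := by
  intro L
  induction L with
  | nil => intro b; exact ⟨Or.inl rfl, le_rfl, by simp⟩
  | cons a L ih =>
    intro b
    rw [List.foldl_cons]
    obtain ⟨ih1, ih2, ih3⟩ := ih (pvBStep g ai bi x bound b a)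
    by_cases hc : a ≤ bound ∧ g * (PySem.Int.floordiv x a - a) < bi - ai ∧ b < a
    · have hstep : pvBStep g ai bi x bound b a = a := by unfold pvBStep; rw [if_pos hc]
      rw [hstep] at ih1 ih2 ih3 ⊢
      refine ⟨?_, by omega, ?_⟩
      · rcases ih1 with h | h
        · exact Or.inr ⟨by rw [h]; exact List.mem_cons_self .., by rw [h]; exact hc.1,
            by rw [h]; exact hc.2.1⟩
        · exact Or.inr ⟨List.mem_cons_of_mem _ h.1, h.2.1, h.2.2⟩
      · intro aa haa h1 h2
        rcases List.mem_cons.mp haa with rfl | haa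
        · exact ih2
        · exact ih3 aa haa h1 h2
    · have hstep : pvBStep g ai bi x bound b a = b := by unfold pvBStep; rw [if_neg hc]
      rw [hstep] at ih1 ih2 ih3 ⊢
      refine ⟨?_, ih2, ?_⟩
      · rcases ih1 with h | h
        · exact Or.inl h
        · exact Or.inr ⟨List.mem_cons_of_mem _ h.1, h.2.1, h.2.2⟩
      · intro aa haa h1 h2
        rcases List.mem_cons.mp haa with rfl | haa
        · -- the if failed but first two conjuncts hold, so aa ≤ b
          have : ¬ b < aa := fun hlt => hc ⟨h1, h2, hlt⟩
          omega
        · exact ih3 aa haa h1 h2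

-- ===== VERDICT (by name: the statement is the Claim_ definition above) =====
theorem find_a_and_b_for_lcm_and_gcd_spec : Claim_equal_find_a_and_b_for_lcm_and_gcd := by
  intro lcm g ai bi _hdom hpre
  obtain ⟨hg, hx0⟩ := hpre
  unfold Spec_find_a_and_b_for_lcm_and_gcd find_a_and_b_for_lcm_and_gcd find_a_and_b_for_lcm_and_gcd_alt
  simp only []
  set x := PySem.Int.floordiv lcm g with hxdef
  by_cases hx : x = 0
  · rw [if_pos hx, hx]
    have : pvIntSqrt 0 = 0 := by simp [pvIntSqrt]
    simp [pvDivisorsFromSqrtTo1, this, PySem.List.pyRange_neg_one_eq_nil (by omega : (0:Int) ≤ 0),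
      pvALoop]
  · rw [if_neg hx]
    have hx1 : 1 ≤ x := by omega
    obtain ⟨hprod, hpp, hpw⟩ := pvPrimePowers_inv x 2 [] hx1 le_rfl
      (by intro d h1 h2 _; omega) (by simp) (by simp) (by simp)
    rw [List.prod_nil, one_mul] at hprod
    set qs := pvPrimePowers x 2 [] with hqsdef
    set s := pvIntSqrt x with hsdef
    have hposqs : ∀ q ∈ qs, 1 ≤ q := by
      intro q hq
      obtain ⟨p, k, hpr, hp2, hk, hpk⟩ := hpp q hq
      rw [← hpk]
      have := pow_pos (show (0:Int) < p by omega) k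
      omega
    -- (L1) every subset product is a positive unitary divisor of x
    have hL1 : ∀ a ∈ pvSubsetProducts qs, 1 ≤ a ∧ PySem.Int.mod x a = 0 ∧
        Int.gcd a (PySem.Int.floordiv x a) = 1 := by
      intro a ha
      obtain ⟨t, ht, rfl⟩ := (mem_pvSubsetProducts qs a).mp ha
      obtain ⟨h1, c, hc, hcop⟩ := sublist_unitary ht hposqs hpw
      rw [hprod] at hc
      have hdvd : t.prod ∣ x := ⟨c, hc.symm⟩
      have hfd : PySem.Int.floordiv x t.prod = c := by
        rw [PySem.Int.floordiv_eq_ediv_of_pos (by omega), ← hc]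
        exact Int.mul_ediv_cancel_left c (by omega)
      refine ⟨h1, ?_, ?_⟩
      · rw [PySem.Int.mod_eq_emod_of_pos (by omega)]
        exact Int.emod_eq_zero_of_dvd hdvd
      · rw [hfd]
        exact Int.isCoprime_iff_gcd_eq_one.mp hcop
    -- (L2) every positive unitary divisor of x is a subset product
    have hL2 : ∀ y : Int, 1 ≤ y → PySem.Int.mod x y = 0 →
        Int.gcd y (PySem.Int.floordiv x y) = 1 → y ∈ pvSubsetProducts qs := by
      intro y hy hmod hgcd
      have hdvd : y ∣ x := Int.dvd_of_emod_eq_zero (by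
        rwa [PySem.Int.mod_eq_emod_of_pos (by omega : (0:Int) < y)] at hmod)
      have hfd : PySem.Int.floordiv x y = x / y := PySem.Int.floordiv_eq_ediv_of_pos (by omega)
      have hyc : y * (x / y) = x := Int.mul_ediv_cancel' hdvd
      have hcop : IsCoprime y (x / y) := by
        rw [Int.isCoprime_iff_gcd_eq_one]
        rwa [hfd] at hgcd
      obtain ⟨t, ht, hteq⟩ := unitary_mem_sublist qs hpp hpw y (x / y) hy
        (by rw [hyc, hprod]) hcop
      exact (mem_pvSubsetProducts qs y).mpr ⟨t, ht, hteq⟩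
    -- A's side
    have hmem : ∀ y ∈ PySem.List.pyRange s 0 (-1), 1 ≤ y := by
      intro y hy
      rw [PySem.List.mem_pyRange_neg_one] at hy
      omega
    rw [pvDivisorsFromSqrtTo1, ← hsdef, pvALoop_find g ai bi x (by omega) _ hmem]
    -- B's side
    obtain ⟨hB1, hB2, hB3⟩ := foldl_best g ai bi x s (pvSubsetProducts qs) 0
    set r := (pvSubsetProducts qs).foldl (pvBStep g ai bi x s) 0 with hrdef
    rcases hfind : (PySem.List.pyRange s 0 (-1)).find? (pvFullP g ai bi x) with _ | m
    · -- no qualifying divisor: A defaults; show r = 0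
      have hnone := List.find?_eq_none.mp hfind
      have hr0 : r = 0 := by
        rcases hB1 with h | ⟨hmem', hle, hcond⟩
        · exact h
        · exfalso
          obtain ⟨h1, hmod, hgcd⟩ := hL1 r hmem'
          have hrange : r ∈ PySem.List.pyRange s 0 (-1) := by
            rw [PySem.List.mem_pyRange_neg_one]; omega
          exact hnone r hrange (by
            unfold pvFullP
            simp only [decide_eq_true_eq]
            exact ⟨hmod, hcond, hgcd⟩)
      rw [if_pos hr0]
    · -- qualifying divisor m: both return (g*m, g*(x//m))
      obtain ⟨hPm, hmmem, hmax⟩ := find?_desc_max (pyRange_desc s 0) m hfind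
      have hmrange := PySem.List.mem_pyRange_neg_one.mp hmmem
      obtain ⟨hmod, hcond, hgcd⟩ : PySem.Int.mod x m = 0 ∧
          g * (PySem.Int.floordiv x m - m) < bi - ai ∧
          Int.gcd m (PySem.Int.floordiv x m) = 1 := by
        have := of_decide_eq_true hPm
        exact this
      have hmSP : m ∈ pvSubsetProducts qs := hL2 m (by omega) hmod hgcd
      have hmr : m ≤ r := hB3 m hmSP (by omega) hcond
      have hrpos : 1 ≤ r := by omega
      rcases hB1 with h | ⟨hmem', hle, hcondr⟩
      · omega
      · obtain ⟨h1, hmodr, hgcdr⟩ := hL1 r hmem'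
        have hrrange : r ∈ PySem.List.pyRange s 0 (-1) := by
          rw [PySem.List.mem_pyRange_neg_one]; omega
        have hrm : r ≤ m := hmax r hrrange (by
          unfold pvFullP
          simp only [decide_eq_true_eq]
          exact ⟨hmodr, hcondr, hgcdr⟩)
        have : r = m := le_antisymm hrm hmr
        rw [if_neg (by omega), this]
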